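-- pv_equiv track=rewrite | github.com/chris-data-pro/python-algorithm | algorithm/bs_sorted_list.py | shortest_time_to_finish
-- ===== SOURCE A (Python) =====
-- def shortest_time_to_finish(tasks, k):
--     if not tasks:
--         return 0
--
--     def can_complete(hours, n, total_hours):  # assume we know the number of total hours allowed
--         person = 1
--         hour_accumulated = 0
--
--         for hour in hours:
--             if hour_accumulated + hour <= total_hours:
--                 hour_accumulated += hour
--             else:
--                 person += 1
--                 hour_accumulated = hour
--
--         return person <= n
--
--     start, end = max(tasks), sum(tasks)  # do a BS on a sorted list from start to end
--
--     while start + 1 < end: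
--         mid = (start + end) // 2
--
--         if can_complete(tasks, k, mid):
--             end = mid
--         else:
--             start = mid
--
--     if can_complete(tasks, k, start):
--         return start
--
--     return end
-- ===== SOURCE B (Python) =====
-- def shortest_time_to_finish(tasks, k):
--     n = len(tasks)
--     prefix = [0]
--     running = 0
--     for t in tasks:
--         running += t
--         prefix.append(running)
--     m = min(max(k, 1), n)  # more groups than tasks never helps; k <= 0 still needs one worker
--     dp = prefix[:]  # budget of one group: dp[i] = sum of first i tasks
--     for _ in range(m - 1):  # raise the group budget one at a time up to m
--         dp = [min((max(dp[p], prefix[i] - prefix[p]) for p in range(i)), default=0)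
--               for i in range(n + 1)]
--     return dp[n]
-- ===== Notes on version B (the rewrite author's own statement) =====
-- stated objective: alternative
-- what changed: Replaces A's binary search on a feasibility threshold (greedy can_complete check) by a bottom-up dynamic program over prefix sums: dp[j][i] = minimum possible maximum segment sum splitting the first i tasks into at most j groups, with the group budget capped at min(max(k,1), n).
-- outside the precondition, e.g. on shortest_time_to_finish([6, -7], 4): A returns 6, B returns 0
import Mathlib
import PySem

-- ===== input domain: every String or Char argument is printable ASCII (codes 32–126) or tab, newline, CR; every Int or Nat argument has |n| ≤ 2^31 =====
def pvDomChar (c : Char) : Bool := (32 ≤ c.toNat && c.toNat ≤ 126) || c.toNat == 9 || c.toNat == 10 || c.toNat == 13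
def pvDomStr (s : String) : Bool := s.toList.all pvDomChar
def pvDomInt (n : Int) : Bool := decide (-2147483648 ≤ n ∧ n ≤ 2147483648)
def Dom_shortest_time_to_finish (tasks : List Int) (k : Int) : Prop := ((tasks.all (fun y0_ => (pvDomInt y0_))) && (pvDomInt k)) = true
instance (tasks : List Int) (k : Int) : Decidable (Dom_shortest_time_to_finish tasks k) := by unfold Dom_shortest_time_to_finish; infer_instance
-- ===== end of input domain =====

-- B replaces A's binary search over a feasibility threshold by a bottom-up DP over prefix
-- sums (dp[j][i] = best max-segment-sum splitting the first i tasks into at most j groups);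
-- objective: alternative algorithm, not claimed faster.

-- ===== PORT A =====
-- body of can_complete's for-loop (state = (person, hour_accumulated))
def stf_gstep (total_hours : Int) (s : Int × Int) (hour : Int) : Int × Int :=
  if s.2 + hour ≤ total_hours then (s.1, s.2 + hour) else (s.1 + 1, hour)

def stf_canComplete (hours : List Int) (n : Int) (total_hours : Int) : Bool :=
  decide ((hours.foldl (stf_gstep total_hours) (1, 0)).1 ≤ n)

-- the while-loop of A (binary search between start and end)
def stf_loop (tasks : List Int) (k : Int) (start e : Int) : Int :=
  if _h : start + 1 < e then
    let mid := PySem.Int.floordiv (start + e) 2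
    if stf_canComplete tasks k mid then stf_loop tasks k start mid
    else stf_loop tasks k mid e
  else if stf_canComplete tasks k start then start else e
termination_by (e - start).toNat
decreasing_by
  · have hfd : PySem.Int.floordiv (start + e) 2 = (start + e) / 2 :=
      PySem.Int.floordiv_eq_ediv_of_pos (by norm_num)
    simp only [hfd]; omega
  · have hfd : PySem.Int.floordiv (start + e) 2 = (start + e) / 2 :=
      PySem.Int.floordiv_eq_ediv_of_pos (by norm_num)
    simp only [hfd]; omega

def shortest_time_to_finish (tasks : List Int) (k : Int) : Int :=
  if tasks = [] then 0
  else stf_loop tasks k ((PySem.List.max? tasks (fun y => y)).getD 0) tasks.sum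

-- ===== PORT B =====
-- min(gen, default=d) over an already materialised list
def stf_minD (xs : List Int) (d : Int) : Int :=
  match xs with
  | [] => d
  | y :: ys => ys.foldl min y

-- one round of the DP: raise the group budget by one
def stf_step (pref : List Int) (n : Nat) (dp : List Int) : List Int :=
  (List.range (n + 1)).map (fun i =>
    stf_minD ((List.range i).map (fun p => max (dp.getD p 0) (pref.getD i 0 - pref.getD p 0))) 0)

def shortest_time_to_finish_alt (tasks : List Int) (k : Int) : Int :=
  let n := tasks.length
  let pref := (tasks.foldl (fun (st : List Int × Int) t => (st.1 ++ [st.2 + t], st.2 + t)) ([0], 0)).1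
  let m : Int := min (max k 1) (n : Int)
  let dp := (List.range (m - 1).toNat).foldl (fun dp _ => stf_step pref n dp) pref
  dp.getD n 0

-- ===== PRECONDITION & SPEC =====
-- Pre_ keeps the natural domain of the task (nonnegative task durations) plus every input whose
-- answer is forced anyway (at most one task, or k ≤ 0); it excludes only multi-task lists holding
-- a negative duration with k ≥ 1, where A still returns, but its value is an artifact of
-- binary-searching a feasibility predicate that is non-monotone for negative durations.
def Pre_shortest_time_to_finish (tasks : List Int) (k : Int) : Prop :=
  (∀ x ∈ tasks, 0 ≤ x) ∨ tasks.length ≤ 1 ∨ k ≤ 0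
instance (tasks : List Int) (k : Int) : Decidable (Pre_shortest_time_to_finish tasks k) := by
  unfold Pre_shortest_time_to_finish; infer_instance

def pvWitness_shortest_time_to_finish : List Int × Int := ([3, 1, 4, 1, 5], 2)

def Spec_shortest_time_to_finish (tasks : List Int) (k : Int) (out : Int) : Prop := out = shortest_time_to_finish_alt tasks k
instance (tasks : List Int) (k : Int) (out : Int) : Decidable (Spec_shortest_time_to_finish tasks k out) := by unfold Spec_shortest_time_to_finish; infer_instance

-- ===== CLAIM (what is proved, stated in full; the proofs are below) =====
def Claim_equal_shortest_time_to_finish : Prop := ∀ (tasks : List Int) (k : Int), Dom_shortest_time_to_finish tasks k → Pre_shortest_time_to_finish tasks k → Spec_shortest_time_to_finish tasks k (shortest_time_to_finish tasks k)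

-- ===== LEMMAS AND PROOFS =====

-- «there is a split of tasks into at most m contiguous (possibly empty) chunks, each of sum ≤ T»
def stf_PartOK (tasks : List Int) (m T : Int) : Prop :=
  ∃ parts : List (List Int), parts.flatten = tasks ∧ (parts.length : Int) ≤ m ∧ ∀ p ∈ parts, p.sum ≤ T

-- person counter never decreases
theorem stf_person_mono (T : Int) (ts : List Int) (q a : Int) :
    q ≤ (ts.foldl (stf_gstep T) (q, a)).1 := by
  induction ts generalizing q a with
  | nil => simp
  | cons h t ih =>
    simp only [List.foldl_cons, stf_gstep]
    split
    · exact ih q (a + h)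
    · exact le_trans (by omega) (ih (q + 1) h)

-- greedy never breaks while the running total stays within T
theorem stf_nobreak (T : Int) (ts : List Int) (q b : Int)
    (hpos : ∀ x ∈ ts, 0 ≤ x) (hb : 0 ≤ b) (hle : b + ts.sum ≤ T) :
    ts.foldl (stf_gstep T) (q, b) = (q, b + ts.sum) := by
  induction ts generalizing b with
  | nil => simp
  | cons h t ih =>
    have hh : 0 ≤ h := hpos h (by simp)
    have ht : ∀ x ∈ t, 0 ≤ x := fun x hx => hpos x (by simp [hx])
    have hts : 0 ≤ t.sum := List.sum_nonneg ht
    simp only [List.foldl_cons, stf_gstep, List.sum_cons] at *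
    rw [if_pos (by omega)]
    rw [ih (b + h) ht (by omega) (by omega)]
    exact Prod.ext rfl (by simp; ring)

-- one chunk (sum ≤ T) costs at most one extra person
theorem stf_one_part (T : Int) (part : List Int) (q a : Int)
    (hpos : ∀ x ∈ part, 0 ≤ x) (hsum : part.sum ≤ T) (ha : 0 ≤ a) :
    part.foldl (stf_gstep T) (q, a) = (q, a + part.sum) ∨
    ((part.foldl (stf_gstep T) (q, a)).1 = q + 1 ∧ 0 ≤ (part.foldl (stf_gstep T) (q, a)).2 ∧
      (part.foldl (stf_gstep T) (q, a)).2 ≤ part.sum) := by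
  induction part generalizing q a with
  | nil => left; simp
  | cons h t ih =>
    have hh : 0 ≤ h := hpos h (by simp)
    have ht : ∀ x ∈ t, 0 ≤ x := fun x hx => hpos x (by simp [hx])
    have hts : 0 ≤ t.sum := List.sum_nonneg ht
    simp only [List.sum_cons] at hsum
    by_cases hc : a + h ≤ T
    · simp only [List.foldl_cons, stf_gstep, if_pos hc]
      rcases ih q (a + h) ht (by omega) (by omega) with h1 | h1
      · left; rw [h1]; exact Prod.ext rfl (by simp; ring)
      · right; refine ⟨h1.1, h1.2.1, ?_⟩
        have := h1.2.2; simp only [List.sum_cons]; omega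
    · simp only [List.foldl_cons, stf_gstep, if_neg hc]
      rw [stf_nobreak T t (q + 1) h ht hh (by omega)]
      right; exact ⟨rfl, by omega, by simp only [List.sum_cons]; omega⟩

-- greedy optimality over the tail parts
theorem stf_greedy_parts (T : Int) (parts : List (List Int)) (q a : Int)
    (hpos : ∀ p ∈ parts, ∀ x ∈ p, 0 ≤ x) (hsum : ∀ p ∈ parts, p.sum ≤ T) (ha : 0 ≤ a) :
    (parts.flatten.foldl (stf_gstep T) (q, a)).1 ≤ q + parts.length ∧
    0 ≤ (parts.flatten.foldl (stf_gstep T) (q, a)).2 := by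
  induction parts generalizing q a with
  | nil => constructor <;> simpa
  | cons part tl ih =>
    have hp : ∀ x ∈ part, 0 ≤ x := hpos part (by simp)
    have hps : part.sum ≤ T := hsum part (by simp)
    have htlpos : ∀ p ∈ tl, ∀ x ∈ p, 0 ≤ x := fun p hp' => hpos p (by simp [hp'])
    have htlsum : ∀ p ∈ tl, p.sum ≤ T := fun p hp' => hsum p (by simp [hp'])
    simp only [List.flatten_cons, List.foldl_append, List.length_cons]
    rcases stf_one_part T part q a hp hps ha with h1 | h1
    · rw [h1]
      have := ih q (a + part.sum) htlpos htlsum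
        (by have := List.sum_nonneg hp; omega)
      omega
    · obtain ⟨hq, ha2, _⟩ := h1
      have := ih (part.foldl (stf_gstep T) (q, a)).1 (part.foldl (stf_gstep T) (q, a)).2
        htlpos htlsum ha2
      rcases this with ⟨h3, h4⟩
      constructor
      · calc _ ≤ (part.foldl (stf_gstep T) (q, a)).1 + tl.length := by
              simpa using h3
          _ ≤ q + (tl.length + 1) := by omega
      · simpa using h4
  -- the `Prod.mk.eta`-style rewriting is handled by simpa

-- dropping empty chunks
theorem stf_filter_ne (parts : List (List Int)) :
    (parts.filter (fun p => !p.isEmpty)).flatten = parts.flatten := by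
  induction parts with
  | nil => rfl
  | cons p tl ih =>
    by_cases hp : p.isEmpty <;>
      simp_all [List.filter_cons, List.isEmpty_iff]

theorem stf_nonempty_parts_le (parts : List (List Int))
    (hne : ∀ p ∈ parts, p ≠ []) : parts.length ≤ parts.flatten.length := by
  induction parts with
  | nil => simp
  | cons p tl ih =>
    have hp : p ≠ [] := hne p (by simp)
    have : 1 ≤ p.length := List.length_pos_iff.2 hp
    have := ih (fun q hq => hne q (by simp [hq]))
    simp only [List.length_cons, List.flatten_cons, List.length_append]
    omega

-- greedy optimality: a valid split into m parts bounds the greedy person count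
theorem stf_G2 (T : Int) (tasks : List Int) (m : Int)
    (hpos : ∀ x ∈ tasks, 0 ≤ x) (hne : tasks ≠ [])
    (hok : stf_PartOK tasks m T) :
    ((tasks.foldl (stf_gstep T) (1, 0)).1) ≤ m := by
  obtain ⟨parts, hfl, hlen, hsums⟩ := hok
  set parts' := parts.filter (fun p => !p.isEmpty) with hp'
  have hfl' : parts'.flatten = tasks := by rw [hp', stf_filter_ne, hfl]
  have hlen' : (parts'.length : Int) ≤ m :=
    le_trans (by exact_mod_cast List.length_filter_le _ _) hlen
  have hmem : ∀ p ∈ parts', p ∈ parts := fun p hp => (List.mem_filter.1 hp).1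
  have hsums' : ∀ p ∈ parts', p.sum ≤ T := fun p hp => hsums p (hmem p hp)
  have hpos' : ∀ p ∈ parts', ∀ x ∈ p, 0 ≤ x := by
    intro p hp x hx
    exact hpos x (by rw [← hfl']; exact List.mem_flatten.2 ⟨p, hp, hx⟩)
  match hpp : parts' with
  | [] => exact absurd (by simpa [hpp] using hfl') hne
  | part :: tl =>
    rw [← hfl', List.flatten_cons, List.foldl_append]
    rw [stf_nobreak T part 1 0 (hpos' part (by simp)) le_rfl
      (by simpa using hsums' part (by simp))]
    have := stf_greedy_parts T tl 1 (0 + part.sum)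
      (fun p hp => hpos' p (by simp [hp]))
      (fun p hp => hsums' p (by simp [hp]))
      (by have := List.sum_nonneg (hpos' part (by simp)); omega)
    have hl : ((part :: tl).length : Int) ≤ m := hlen'
    simp only [List.length_cons] at hl
    push_cast at hl
    omega

-- greedy soundness: from a successful greedy run, extract a valid split
theorem stf_L2 (T : Int) (ts : List Int) (q a : Int)
    (hpos : ∀ x ∈ ts, 0 ≤ x) (hle : ∀ x ∈ ts, x ≤ T) (ha0 : 0 ≤ a) (haT : a ≤ T) :
    ∃ parts : List (List Int), parts.flatten = ts ∧
      (parts.length : Int) = (ts.foldl (stf_gstep T) (q, a)).1 - q + 1 ∧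
      (∀ p ∈ parts, p.sum ≤ T) ∧ a + (parts.headD []).sum ≤ T := by
  induction ts generalizing q a with
  | nil => exact ⟨[[]], by simp, by simp, by intro p hp; simp at hp; simp [hp]; omega, by simpa⟩
  | cons h t ih =>
    have hh : 0 ≤ h := hpos h (by simp)
    have hhT : h ≤ T := hle h (by simp)
    have htpos : ∀ x ∈ t, 0 ≤ x := fun x hx => hpos x (by simp [hx])
    have htle : ∀ x ∈ t, x ≤ T := fun x hx => hle x (by simp [hx])
    by_cases hc : a + h ≤ T
    · obtain ⟨parts, hfl, hlen, hsums, hhead⟩ := ih q (a + h) htpos htle (by omega) hc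
      cases parts with
      | nil =>
        exfalso
        have hm := stf_person_mono T t q (a + h)
        simp at hlen
        omega
      | cons head tail =>
        simp only [List.headD_cons] at hhead
        refine ⟨(h :: head) :: tail, ?_, ?_, ?_, ?_⟩
        · simpa using hfl
        · simp only [List.foldl_cons, stf_gstep, if_pos hc]
          simpa using hlen
        · intro p hp
          rcases List.mem_cons.1 hp with rfl | hp
          · simp only [List.sum_cons]; omega
          · exact hsums p (by simp [hp])
        · simp only [List.headD_cons, List.sum_cons]; omega
    · obtain ⟨parts, hfl, hlen, hsums, hhead⟩ := ih (q + 1) h htpos htle hh hhT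
      cases parts with
      | nil =>
        exfalso
        have hm := stf_person_mono T t (q + 1) h
        simp at hlen
        omega
      | cons head tail =>
        simp only [List.headD_cons] at hhead
        refine ⟨[] :: (h :: head) :: tail, ?_, ?_, ?_, ?_⟩
        · simpa using hfl
        · simp only [List.foldl_cons, stf_gstep, if_neg hc]
          simp only [List.length_cons] at hlen ⊢
          push_cast at hlen ⊢
          omega
        · intro p hp
          rcases List.mem_cons.1 hp with rfl | hp
          · simp; omega
          · rcases List.mem_cons.1 hp with rfl | hp
            · simp only [List.sum_cons]; omega
            · exact hsums p (by simp [hp])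
        · simpa using haT


-- prefix list of B equals the take-sums
theorem stf_pref_eq (tasks : List Int) :
    (tasks.foldl (fun (st : List Int × Int) t => (st.1 ++ [st.2 + t], st.2 + t)) ([0], 0)).1
      = (List.range (tasks.length + 1)).map (fun i => ((tasks.take i).sum : Int)) := by
  have key : ∀ (ts : List Int) (acc : List Int) (r : Int),
      ts.foldl (fun (st : List Int × Int) t => (st.1 ++ [st.2 + t], st.2 + t)) (acc, r)
        = (acc ++ (List.range ts.length).map (fun i => r + (ts.take (i + 1)).sum), r + ts.sum) := by
    intro ts
    induction ts with
    | nil => intro acc r; simp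
    | cons t ts' ih =>
      intro acc r
      simp only [List.foldl_cons, ih, List.length_cons, List.sum_cons]
      have h2 : r + t + ts'.sum = r + (t + ts'.sum) := by ring
      have h1 : acc ++ [r + t] ++ List.map (fun i => r + t + (List.take (i + 1) ts').sum) (List.range ts'.length)
          = acc ++ List.map (fun i => r + (List.take (i + 1) (t :: ts')).sum) (List.range (ts'.length + 1)) := by
        rw [List.range_succ_eq_map, List.map_cons, List.map_map, List.append_assoc,
          List.singleton_append]
        congr 1
        congr 1
        · simp
        · exact List.map_congr_left (fun i hi => by simp [Function.comp_def]; ring)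
      exact Prod.ext h1 h2
  rw [key]
  show [0] ++ List.map (fun i => 0 + (List.take (i + 1) tasks).sum) (List.range tasks.length) = _
  rw [List.range_succ_eq_map, List.map_cons, List.map_map, List.singleton_append]
  congr 1
  exact List.map_congr_left (fun i hi => by simp [Function.comp_def])

theorem stf_minD_le_iff (xs : List Int) (d T : Int) :
    stf_minD xs d ≤ T ↔ (xs = [] ∧ d ≤ T) ∨ ∃ y ∈ xs, y ≤ T := by
  have fm : ∀ (ys : List Int) (y : Int), ys.foldl min y ≤ T ↔ y ≤ T ∨ ∃ z ∈ ys, z ≤ T := by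
    intro ys
    induction ys with
    | nil => simp
    | cons z ys' ih =>
      intro y
      simp only [List.foldl_cons, ih, min_le_iff]
      constructor
      · rintro ((h | h) | ⟨w, hw, hT⟩)
        · exact Or.inl h
        · exact Or.inr ⟨z, by simp, h⟩
        · exact Or.inr ⟨w, by simp [hw], hT⟩
      · rintro (h | ⟨w, hw, hT⟩)
        · exact Or.inl (Or.inl h)
        · rcases List.mem_cons.1 hw with rfl | hw
          · exact Or.inl (Or.inr hT)
          · exact Or.inr ⟨w, hw, hT⟩
  match xs with
  | [] => simp [stf_minD]
  | y :: ys =>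
    simp only [stf_minD, fm]
    constructor
    · rintro (h | ⟨z, hz, hT⟩)
      · exact Or.inr ⟨y, by simp, h⟩
      · exact Or.inr ⟨z, by simp [hz], hT⟩
    · rintro (⟨h, _⟩ | ⟨z, hz, hT⟩)
      · simp at h
      · rcases List.mem_cons.1 hz with rfl | hz
        · exact Or.inl hT
        · exact Or.inr ⟨z, hz, hT⟩

-- getD of a mapped range
theorem stf_map_range_getD (f : Nat → Int) (c i : Nat) (h : i < c) :
    ((List.range c).map f).getD i 0 = f i := by
  rw [List.getD_eq_getElem?_getD]
  simp [List.getElem?_map, List.getElem?_range, h]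

theorem stf_foldl_range_succ {α : Type} (g : α → α) (j : Nat) (x : α) :
    (List.range (j + 1)).foldl (fun d _ => g d) x = g ((List.range j).foldl (fun d _ => g d) x) := by
  rw [List.range_succ, List.foldl_append]
  rfl

theorem stf_drop_sum (l : List Int) (p : Nat) :
    (l.drop p).sum = l.sum - (l.take p).sum := by
  have := List.take_append_drop p l
  have h2 : (l.take p ++ l.drop p).sum = l.sum := by rw [this]
  rw [List.sum_append] at h2
  omega

-- the dp list after j rounds (proof-side name for B's fold)
def stf_dpj (tasks : List Int) (j : Nat) : List Int :=
  (List.range j).foldl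
    (fun dp _ => stf_step ((List.range (tasks.length + 1)).map (fun i => ((tasks.take i).sum : Int))) tasks.length dp)
    ((List.range (tasks.length + 1)).map (fun i => ((tasks.take i).sum : Int)))

theorem stf_alt_eq (tasks : List Int) (k : Int) :
    shortest_time_to_finish_alt tasks k
      = (stf_dpj tasks (min (max k 1) (tasks.length : Int) - 1).toNat).getD tasks.length 0 := by
  simp only [shortest_time_to_finish_alt, stf_pref_eq, stf_dpj]

theorem stf_dpj_succ (tasks : List Int) (j : Nat) :
    stf_dpj tasks (j + 1)
      = stf_step ((List.range (tasks.length + 1)).map (fun i => ((tasks.take i).sum : Int))) tasks.length (stf_dpj tasks j) := by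
  rw [stf_dpj, stf_foldl_range_succ]
  rfl

theorem stf_step_getD (tasks : List Int) (dp : List Int) (i : Nat) (hi : i ≤ tasks.length) :
    (stf_step ((List.range (tasks.length + 1)).map (fun i => ((tasks.take i).sum : Int))) tasks.length dp).getD i 0
      = stf_minD ((List.range i).map (fun p =>
          max (dp.getD p 0) ((tasks.take i).sum - (tasks.take p).sum))) 0 := by
  rw [stf_step, stf_map_range_getD _ _ i (by omega)]
  congr 1
  apply List.map_congr_left
  intro p hp
  have hpi : p < i := List.mem_range.1 hp
  rw [stf_map_range_getD _ _ i (by omega), stf_map_range_getD _ _ p (by omega)]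

-- dp value after j rounds, lower characterisation (value ≤ T gives a split)
theorem stf_dp_le (tasks : List Int) (j : Nat) (i : Nat) (hi : i ≤ tasks.length) (T : Int)
    (h : (stf_dpj tasks j).getD i 0 ≤ T) :
    ∃ parts : List (List Int), parts.flatten = tasks.take i ∧ parts.length ≤ j + 1 ∧
      ∀ p ∈ parts, p.sum ≤ T := by
  induction j generalizing i with
  | zero =>
    rw [stf_dpj] at h
    simp only [List.range_zero, List.foldl_nil] at h
    rw [stf_map_range_getD _ _ i (by omega)] at h
    exact ⟨[tasks.take i], by simp, by simp, by intro p hp; simp at hp; simpa [hp] using h⟩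
  | succ j ih =>
    rw [stf_dpj_succ, stf_step_getD tasks _ i hi] at h
    rcases (stf_minD_le_iff _ _ T).1 h with ⟨hnil, _⟩ | ⟨y, hy, hyT⟩
    · have hi0 : i = 0 := by
        by_contra hne
        have : 0 ∈ List.range i := List.mem_range.2 (Nat.pos_of_ne_zero hne)
        simp [List.map_eq_nil_iff, List.range_eq_nil] at hnil
        omega
      exact ⟨[], by simp [hi0], by simp, by simp⟩
    · obtain ⟨p, hp, rfl⟩ := List.mem_map.1 hy
      have hpi : p < i := List.mem_range.1 hp
      have h1 : (stf_dpj tasks j).getD p 0 ≤ T := le_trans (le_max_left _ _) hyT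
      have h2 : (tasks.take i).sum - (tasks.take p).sum ≤ T := le_trans (le_max_right _ _) hyT
      obtain ⟨parts0, hf0, hl0, hs0⟩ := ih p (by omega) h1
      refine ⟨parts0 ++ [(tasks.take i).drop p], ?_, ?_, ?_⟩
      · rw [List.flatten_append, hf0]
        have htk : tasks.take p = (tasks.take i).take p := by
          rw [List.take_take]; congr 1; omega
        rw [htk]
        simp [List.take_append_drop]
      · simp only [List.length_append, List.length_cons, List.length_nil]
        omega
      · intro q hq
        rcases List.mem_append.1 hq with hq | hq
        · exact hs0 q hq
        · simp only [List.mem_singleton] at hq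
          subst hq
          rw [stf_drop_sum]
          have htk : (tasks.take i).take p = tasks.take p := by
            rw [List.take_take]; congr 1; omega
          rw [htk]
          exact h2

-- dp value after j rounds, upper characterisation (a split bounds the value)
theorem stf_dp_ge (tasks : List Int) (j : Nat) (i : Nat) (hi : i ≤ tasks.length) (T : Int)
    (hT : 0 ≤ T)
    (hex : ∃ parts : List (List Int), parts.flatten = tasks.take i ∧ parts.length ≤ j + 1 ∧
      ∀ p ∈ parts, p.sum ≤ T) :
    (stf_dpj tasks j).getD i 0 ≤ T := by
  induction j generalizing i with
  | zero =>
    rw [stf_dpj]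
    simp only [List.range_zero, List.foldl_nil]
    rw [stf_map_range_getD _ _ i (by omega)]
    obtain ⟨parts, hfl, hlen, hsums⟩ := hex
    match parts, hfl, hlen, hsums with
    | [], hfl, _, _ => simp [← hfl]; omega
    | [p], hfl, _, hsums =>
      rw [← hfl]
      simpa using hsums p (by simp)
    | p :: q :: r, _, hlen, _ => simp at hlen
  | succ j ih =>
    rw [stf_dpj_succ, stf_step_getD tasks _ i hi]
    rcases Nat.eq_zero_or_pos i with rfl | hipos
    · rw [(stf_minD_le_iff _ _ T)]
      exact Or.inl ⟨by simp, hT⟩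
    · obtain ⟨parts, hfl, hlen, hsums⟩ := hex
      set parts' := parts.filter (fun p => !p.isEmpty) with hdef
      have hfl' : parts'.flatten = tasks.take i := by rw [hdef, stf_filter_ne, hfl]
      have hlen' : parts'.length ≤ j + 2 := le_trans (List.length_filter_le _ _) hlen
      have hsums' : ∀ p ∈ parts', p.sum ≤ T := fun p hp => hsums p (List.mem_filter.1 hp).1
      have hne' : ∀ p ∈ parts', p ≠ [] := by
        intro p hp
        have := (List.mem_filter.1 hp).2
        simpa [List.isEmpty_iff] using this
      rcases List.eq_nil_or_concat parts' with hnil | ⟨init, lastp, hcat⟩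
      · exfalso
        have h0 : tasks.take i = [] := by rw [← hfl', hnil]; rfl
        have hl0 : (tasks.take i).length = i := List.length_take_of_le hi
        rw [h0] at hl0
        simp at hl0
        omega
      · rw [List.concat_eq_append] at hcat
        have hlast : lastp ≠ [] := hne' lastp (by rw [hcat]; simp)
        have hflcat : init.flatten ++ lastp = tasks.take i := by
          rw [← hfl', hcat, List.flatten_append]; simp
        have hleni : (tasks.take i).length = i := List.length_take_of_le hi
        have hlenlast : lastp.length ≤ i := by
          have h := congrArg List.length hflcat
          rw [List.length_append, hleni] at h
          omega
        set p := i - lastp.length with hpdef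
        have hpi : p < i := by
          have : 1 ≤ lastp.length := List.length_pos_iff.2 hlast
          omega
        have hleninit : init.flatten.length = p := by
          have h := congrArg List.length hflcat
          rw [List.length_append, hleni] at h
          omega
        have hinit : init.flatten = tasks.take p := by
          have h1 : init.flatten = (init.flatten ++ lastp).take init.flatten.length :=
            (List.take_left' rfl).symm
          rw [hflcat, hleninit, List.take_take] at h1
          rw [h1]; congr 1; omega
        have hlastp : lastp = (tasks.take i).drop p := by
          have h1 : lastp = (init.flatten ++ lastp).drop init.flatten.length :=
            (List.drop_left' rfl).symm
          rw [hflcat, hleninit] at h1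
          exact h1
        have hinitlen : init.length ≤ j + 1 := by
          have := congrArg List.length hcat
          simp at this
          omega
        have hdpp : (stf_dpj tasks j).getD p 0 ≤ T := by
          apply ih p (by omega)
          exact ⟨init, hinit, hinitlen, fun q hq => hsums' q (by rw [hcat]; simp [hq])⟩
        rw [stf_minD_le_iff]
        refine Or.inr ⟨max ((stf_dpj tasks j).getD p 0) ((tasks.take i).sum - (tasks.take p).sum), ?_, ?_⟩
        · exact List.mem_map.2 ⟨p, List.mem_range.2 hpi, rfl⟩
        · apply max_le hdpp
          have hsum : (tasks.take i).sum - (tasks.take p).sum = lastp.sum := by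
            rw [hlastp, stf_drop_sum]
            have htk : (tasks.take i).take p = tasks.take p := by
              rw [List.take_take]; congr 1; omega
            rw [htk]
          rw [hsum]
          exact hsums' lastp (by rw [hcat]; simp)

-- the binary search converges to V when can_complete is the threshold test «V ≤ T»
theorem stf_bs (tasks : List Int) (k V : Int)
    (hchar : ∀ T, (∀ x ∈ tasks, x ≤ T) → (stf_canComplete tasks k T = true ↔ V ≤ T)) :
    ∀ (N : Nat) (s e : Int), (e - s).toNat ≤ N → (∀ x ∈ tasks, x ≤ s) → s ≤ V → V ≤ e →
      stf_loop tasks k s e = V := by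
  intro N
  induction N with
  | zero =>
    intro s e hN hs hsV hVe
    rw [stf_loop]
    rw [dif_neg (by omega)]
    by_cases hf : stf_canComplete tasks k s = true
    · rw [if_pos hf]
      have := (hchar s hs).1 hf
      omega
    · rw [if_neg hf]
      have : ¬ V ≤ s := fun hVs => hf ((hchar s hs).2 hVs)
      omega
  | succ N ih =>
    intro s e hN hs hsV hVe
    rw [stf_loop]
    by_cases hlt : s + 1 < e
    · rw [dif_pos hlt]
      have hfd : PySem.Int.floordiv (s + e) 2 = (s + e) / 2 :=
        PySem.Int.floordiv_eq_ediv_of_pos (by norm_num)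
      have hb1 : s + 1 ≤ PySem.Int.floordiv (s + e) 2 := by rw [hfd]; omega
      have hb2 : PySem.Int.floordiv (s + e) 2 < e := by rw [hfd]; omega
      have hsmid : ∀ x ∈ tasks, x ≤ PySem.Int.floordiv (s + e) 2 :=
        fun x hx => le_trans (hs x hx) (by omega)
      show (if stf_canComplete tasks k (PySem.Int.floordiv (s + e) 2) = true
          then stf_loop tasks k s (PySem.Int.floordiv (s + e) 2)
          else stf_loop tasks k (PySem.Int.floordiv (s + e) 2) e) = V
      by_cases hf : stf_canComplete tasks k (PySem.Int.floordiv (s + e) 2) = true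
      · rw [if_pos hf]
        exact ih s _ (by omega) hs hsV ((hchar _ hsmid).1 hf)
      · rw [if_neg hf]
        have : ¬ V ≤ PySem.Int.floordiv (s + e) 2 := fun hVs => hf ((hchar _ hsmid).2 hVs)
        exact ih _ e (by omega) hsmid (by omega) hVe
    · rw [dif_neg hlt]
      by_cases hf : stf_canComplete tasks k s = true
      · rw [if_pos hf]
        have := (hchar s hs).1 hf
        omega
      · rw [if_neg hf]
        have : ¬ V ≤ s := fun hVs => hf ((hchar s hs).2 hVs)
        omega

-- if can_complete never succeeds (k below one person), the search drifts to `end`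
theorem stf_bs_false (tasks : List Int) (k : Int)
    (hfalse : ∀ T, stf_canComplete tasks k T = false) :
    ∀ (N : Nat) (s e : Int), (e - s).toNat ≤ N → stf_loop tasks k s e = e := by
  intro N
  induction N with
  | zero =>
    intro s e hN
    rw [stf_loop, dif_neg (by omega), if_neg (by simp [hfalse])]
  | succ N ih =>
    intro s e hN
    rw [stf_loop]
    by_cases hlt : s + 1 < e
    · rw [dif_pos hlt]
      have hfd : PySem.Int.floordiv (s + e) 2 = (s + e) / 2 :=
        PySem.Int.floordiv_eq_ediv_of_pos (by norm_num)
      have hb1 : s + 1 ≤ PySem.Int.floordiv (s + e) 2 := by rw [hfd]; omega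
      show (if stf_canComplete tasks k (PySem.Int.floordiv (s + e) 2) = true
          then stf_loop tasks k s (PySem.Int.floordiv (s + e) 2)
          else stf_loop tasks k (PySem.Int.floordiv (s + e) 2) e) = e
      rw [if_neg (by simp [hfalse])]
      exact ih _ e (by omega)
    · rw [dif_neg hlt, if_neg (by simp [hfalse])]

-- ===== VERDICT (by name: the statement is the Claim_ definition above) =====
theorem shortest_time_to_finish_spec : Claim_equal_shortest_time_to_finish := by
  intro tasks k _hdom hpre
  unfold Spec_shortest_time_to_finish
  by_cases hnil : tasks = []
  · subst hnil
    rw [shortest_time_to_finish, if_pos rfl, stf_alt_eq]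
    have h0 : (min (max k 1) ((([] : List Int).length : Nat) : Int) - 1).toNat = 0 := by
      simp
    rw [h0, stf_dpj]
    simp only [List.range_zero, List.foldl_nil, List.length_nil]
    rw [stf_map_range_getD _ _ 0 (by omega)]
    simp
  · by_cases hk : 1 ≤ k
    case neg =>
      rw [stf_alt_eq]
      have hn1 : 1 ≤ tasks.length := List.length_pos_iff.2 hnil
      have hnc : (1 : Int) ≤ (tasks.length : Int) := by exact_mod_cast hn1
      have hfalse : ∀ T, stf_canComplete tasks k T = false := by
        intro T
        have h1 := stf_person_mono T tasks 1 0
        simp only [stf_canComplete, decide_eq_false_iff_not, not_le]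
        omega
      rw [shortest_time_to_finish, if_neg hnil]
      rw [stf_bs_false tasks k hfalse
        (tasks.sum - ((PySem.List.max? tasks (fun y => y)).getD 0)).toNat _ _ le_rfl]
      have hj0 : (min (max k 1) ((tasks.length : Nat) : Int) - 1).toNat = 0 := by
        have hmi : min (max k 1) ((tasks.length : Nat) : Int) - 1 ≤ 0 := by omega
        omega
      rw [hj0, stf_dpj]
      simp only [List.range_zero, List.foldl_nil]
      rw [stf_map_range_getD _ _ tasks.length (by omega)]
      rw [List.take_length]
    by_cases hpos : ∀ x ∈ tasks, 0 ≤ x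
    case neg =>
      -- the remaining admitted inputs are single-task lists
      have hlen1 : tasks.length = 1 := by
        rcases hpre with h | h | h
        · exact absurd h hpos
        · have := List.length_pos_iff.2 hnil; omega
        · omega
      obtain ⟨x, rfl⟩ := List.length_eq_one_iff.1 hlen1
      rw [stf_alt_eq, shortest_time_to_finish, if_neg hnil]
      have hmax : (PySem.List.max? [x] (fun y => y)).getD 0 = x := by
        rw [PySem.List.max?_id_cons]; rfl
      rw [hmax]
      have hsum : ([x] : List Int).sum = x := by simp
      rw [hsum, stf_loop, dif_neg (by omega)]
      have hcc : stf_canComplete [x] k x = true := by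
        simp only [stf_canComplete, List.foldl_cons, List.foldl_nil, stf_gstep]
        rw [if_pos (by omega)]
        simpa using hk
      rw [if_pos hcc]
      have hj0 : (min (max k 1) ((([x] : List Int).length : Nat) : Int) - 1).toNat = 0 := by
        simp only [List.length_cons, List.length_nil]
        omega
      rw [hj0, stf_dpj]
      simp only [List.range_zero, List.foldl_nil, List.length_cons, List.length_nil]
      rw [stf_map_range_getD _ _ 1 (by omega)]
      simp
    rw [stf_alt_eq]
    set n := tasks.length with hn
    set K := max k 1 with hK
    set mI := min K (n : Int) with hmI
    set j := (mI - 1).toNat with hj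
    have hn1 : 1 ≤ n := List.length_pos_iff.2 hnil
    have hnc : (1 : Int) ≤ (n : Int) := by exact_mod_cast hn1
    have hK1 : 1 ≤ K := by omega
    have hmI1 : 1 ≤ mI := by omega
    have hj1 : (j : Int) = mI - 1 := by rw [hj]; exact Int.toNat_of_nonneg (by omega)
    set V := (stf_dpj tasks j).getD n 0 with hV
    have hVle : ∀ T, V ≤ T → ∃ parts : List (List Int), parts.flatten = tasks ∧
        (parts.length : Int) ≤ K ∧ ∀ p ∈ parts, p.sum ≤ T := by
      intro T hT
      obtain ⟨parts, hfl, hlen, hsums⟩ := stf_dp_le tasks j n le_rfl T (hV ▸ hT)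
      rw [List.take_length] at hfl
      refine ⟨parts, hfl, ?_, hsums⟩
      have : (parts.length : Int) ≤ (j : Int) + 1 := by exact_mod_cast hlen
      omega
    have hVge : ∀ T, 0 ≤ T → (∃ parts : List (List Int), parts.flatten = tasks ∧
        (parts.length : Int) ≤ K ∧ ∀ p ∈ parts, p.sum ≤ T) → V ≤ T := by
      rintro T hT ⟨parts, hfl, hlen, hsums⟩
      set parts' := parts.filter (fun p => !p.isEmpty) with hdef
      have hfl' : parts'.flatten = tasks := by rw [hdef, stf_filter_ne, hfl]
      have hne' : ∀ p ∈ parts', p ≠ [] := by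
        intro p hp
        have := (List.mem_filter.1 hp).2
        simpa [List.isEmpty_iff] using this
      have hlen1 : parts'.length ≤ n := by
        have := stf_nonempty_parts_le parts' hne'
        rw [hfl'] at this
        exact this
      have hlen2 : (parts'.length : Int) ≤ K :=
        le_trans (by exact_mod_cast List.length_filter_le _ _) hlen
      have hlen3 : parts'.length ≤ j + 1 := by
        have h1 : ((parts'.length : Nat) : Int) ≤ (n : Int) := by exact_mod_cast hlen1
        have : ((parts'.length : Nat) : Int) ≤ (j : Int) + 1 := by omega
        exact_mod_cast this
      rw [hV]
      exact stf_dp_ge tasks j n le_rfl T hT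
        ⟨parts', by rw [List.take_length]; exact hfl', hlen3,
          fun p hp => hsums p (List.mem_filter.1 hp).1⟩
    have hmax : ∀ x ∈ tasks, x ≤ V := by
      obtain ⟨parts, hfl, _, hsums⟩ := hVle V le_rfl
      intro x hx
      rw [← hfl] at hx
      obtain ⟨p, hp, hxp⟩ := List.mem_flatten.1 hx
      have hpos : ∀ y ∈ p, 0 ≤ y :=
        fun y hy => hpos y (by rw [← hfl]; exact List.mem_flatten.2 ⟨p, hp, hy⟩)
      exact le_trans (List.single_le_sum hpos x hxp) (hsums p hp)
    have hV0 : 0 ≤ V := by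
      obtain ⟨x, hx⟩ := List.exists_mem_of_ne_nil tasks hnil
      exact le_trans (hpos x hx) (hmax x hx)
    have hVsum : V ≤ tasks.sum :=
      hVge tasks.sum (List.sum_nonneg hpos)
        ⟨[tasks], by simp, by simpa using hK1, by simp⟩
    have hKk : K = k := by omega
    have hchar : ∀ T, (∀ x ∈ tasks, x ≤ T) →
        (stf_canComplete tasks k T = true ↔ V ≤ T) := by
      intro T hleT
      have hT0 : 0 ≤ T := by
        obtain ⟨x, hx⟩ := List.exists_mem_of_ne_nil tasks hnil
        exact le_trans (hpos x hx) (hleT x hx)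
      constructor
      · intro hf
        obtain ⟨parts, hfl, hlen, hsums, _⟩ := stf_L2 T tasks 1 0 hpos hleT le_rfl hT0
        apply hVge T hT0
        refine ⟨parts, hfl, ?_, hsums⟩
        have hp : (tasks.foldl (stf_gstep T) (1, 0)).1 ≤ k := by
          simpa [stf_canComplete] using hf
        omega
      · intro hVT
        obtain ⟨parts, hfl, hlen, hsums⟩ := hVle T hVT
        have := stf_G2 T tasks k hpos hnil ⟨parts, hfl, by omega, hsums⟩
        simpa [stf_canComplete] using this
    rw [shortest_time_to_finish, if_neg hnil]
    have hM : ∃ M, (PySem.List.max? tasks (fun y => y)).getD 0 = M ∧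
        (∀ x ∈ tasks, x ≤ M) ∧ M ∈ tasks := by
      cases tasks with
      | nil => exact absurd rfl hnil
      | cons h t =>
        rw [PySem.List.max?_id_cons]
        refine ⟨t.foldl max h, rfl, ?_, ?_⟩
        · intro x hx
          rcases List.mem_cons.1 hx with rfl | hx
          · exact (PySem.List.le_foldl_max t x).1
          · exact (PySem.List.le_foldl_max t h).2 x hx
        · rcases PySem.List.foldl_max_mem t h with h1 | h1
          · rw [h1]; simp
          · exact List.mem_cons_of_mem _ h1
    obtain ⟨M, hMeq, hsM, hMmem⟩ := hM
    rw [hMeq]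
    exact stf_bs tasks k V hchar (tasks.sum - M).toNat M tasks.sum le_rfl hsM
      (hmax M hMmem) hVsum
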